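-- pv_equiv track=rewrite | github.com/floatingskies/mark-mark | core/vim_mode.py | _has_partial_match
-- ===== SOURCE A (Python) =====
-- def _has_partial_match(sequence: str) -> bool:
--     """Check if sequence is a prefix of any command."""
--     # Check all commands that start with this sequence
--     all_sequences = [
--         'gg', 'gd', 'gD', 'gf', 'ga', 'g8', 'gi', 'gI', 'gh', 'gn', 'gN',
--         'ge', 'gE', 'gu', 'gU', 'g~', 'gq', 'gw', 'gx',
--         'dd', 'cc', 'yy', '>>', '<<', '==',
--         'ci', 'ca', 'di', 'da', 'yi', 'ya',
--         '[[', ']]', '[]', '][',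
--         '[(', '])', '[{', ']}', '[m', ']m', '[M', ']M',
--         'zj', 'zk', 'zo', 'zc', 'za', 'zr', 'zm',
--     ]
--
--     for seq in all_sequences:
--         if seq.startswith(sequence) and seq != sequence:
--             return True
--     return False
-- ===== SOURCE B (Python) =====
-- _PREFIX_CHARS = "gdcy><=[]z"
--
--
-- def _has_partial_match(sequence: str) -> bool:
--     """Check if sequence is a prefix of any command."""
--     # Every command is exactly two characters long, so the proper prefixes are
--     # the empty string and the ten distinct first characters.
--     if sequence == "":
--         return True
--     return len(sequence) == 1 and sequence in _PREFIX_CHARS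
-- ===== Notes on version B (the rewrite author's own statement) =====
-- stated objective: simpler
-- what changed: Replaces the per-call startswith/inequality scan over all 49 commands by a closed-form check: since every command is exactly two characters, the proper prefixes are the empty string and the ten distinct first characters, so B tests emptiness or single-character membership in the first-character string.
import Mathlib
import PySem

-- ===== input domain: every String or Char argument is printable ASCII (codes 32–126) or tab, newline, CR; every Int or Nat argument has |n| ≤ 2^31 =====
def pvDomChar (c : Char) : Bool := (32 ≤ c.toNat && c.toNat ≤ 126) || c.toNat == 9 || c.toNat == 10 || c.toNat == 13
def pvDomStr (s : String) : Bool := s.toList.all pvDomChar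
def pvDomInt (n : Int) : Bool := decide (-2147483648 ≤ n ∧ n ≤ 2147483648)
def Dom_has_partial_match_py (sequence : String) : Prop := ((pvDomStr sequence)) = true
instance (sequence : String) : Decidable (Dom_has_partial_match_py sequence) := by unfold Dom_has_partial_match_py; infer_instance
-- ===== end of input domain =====

-- B replaces A's per-call startswith scan over the command list by a closed-form check:
-- every command is two characters, so the proper prefixes are '' and the ten first characters.


-- ===== PORT A =====
def pvAllSequencesA : List String :=
  ["gg", "gd", "gD", "gf", "ga", "g8", "gi", "gI", "gh", "gn", "gN", "ge", "gE", "gu", "gU", "g~", "gq", "gw", "gx", "dd", "cc", "yy", ">>", "<<", "==", "ci", "ca", "di", "da", "yi", "ya", "[[", "]]", "[]", "][", "[(", "])", "[{", "]}", "[m", "]m", "[M", "]M", "zj", "zk", "zo", "zc", "za", "zr", "zm"]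

-- the 'for seq in all_sequences' loop with its early 'return True'
def pvScanA : List String → String → Bool
  | [], _ => false
  | seq :: rest, sequence =>
      if PySem.Str.startswith seq sequence && !(seq == sequence) then true
      else pvScanA rest sequence

def has_partial_match_py (sequence : String) : Bool :=
  pvScanA pvAllSequencesA sequence

-- ===== PORT B =====
def pvPrefixChars : String := "gdcy><=[]z"

def has_partial_match_py_alt (sequence : String) : Bool :=
  if sequence == "" then true
  else PySem.Str.len sequence == 1 && PySem.Str.isIn sequence pvPrefixChars

-- ===== PRECONDITION & SPEC =====
def Spec_has_partial_match_py (sequence : String) (out : Bool) : Prop := out = has_partial_match_py_alt sequence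
instance (sequence : String) (out : Bool) : Decidable (Spec_has_partial_match_py sequence out) := by unfold Spec_has_partial_match_py; infer_instance

-- ===== CLAIM (what is proved, stated in full; the proofs are below) =====
def Claim_equal_has_partial_match_py : Prop := ∀ (sequence : String), Dom_has_partial_match_py sequence → Spec_has_partial_match_py sequence (has_partial_match_py sequence)

-- ===== LEMMAS AND PROOFS =====

-- A's loop test is exactly "sequence is a proper prefix of seq"
theorem pvTest_eq (cmd s : String) :
    (PySem.Str.startswith cmd s && !(cmd == s))
      = decide (s.toList <+: cmd.toList ∧ s.toList ≠ cmd.toList) := by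
  rw [Bool.eq_iff_iff]
  simp only [Bool.and_eq_true, Bool.not_eq_eq_eq_not, Bool.not_true, beq_eq_false_iff_ne,
    ne_eq, decide_eq_true_eq, PySem.Str.startswith_eq, PySem.Chars.startswith_iff]
  constructor
  · rintro ⟨h1, h2⟩
    exact ⟨h1, fun he => h2 (String.ext_iff.mpr he.symm)⟩
  · rintro ⟨h1, h2⟩
    exact ⟨h1, fun he => h2 (congrArg String.toList he.symm)⟩

-- A's scan-with-early-return is true iff some command passes the per-command test
theorem pvScanA_eq_any (L : List String) (s : String) :
    pvScanA L s = L.any (fun seq => PySem.Str.startswith seq s && !(seq == s)) := by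
  induction L with
  | nil => rfl
  | cons seq rest ih =>
      simp only [pvScanA, List.any_cons, ← ih]
      by_cases h : (PySem.Str.startswith seq s && !(seq == s)) = true
      · rw [if_pos h, h, Bool.true_or]
      · rw [if_neg h, Bool.eq_false_iff.mpr h, Bool.false_or]

-- every command has exactly two characters
theorem pvLen2 : ∀ cmd ∈ pvAllSequencesA, cmd.toList.length = 2 := by decide

-- the first character of every command is one of the ten prefix characters
theorem pvHeadMem : ∀ cmd ∈ pvAllSequencesA,
    cmd.toList.take 1 = [cmd.toList.headD 'x'] ∧ cmd.toList.headD 'x' ∈ pvPrefixChars.toList := by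
  decide

-- every prefix character starts some command
theorem pvCoverB : (pvPrefixChars.toList.all fun c =>
    pvAllSequencesA.any fun cmd => cmd.toList.take 1 == [c]) = true := by decide

theorem pvCover : ∀ c ∈ pvPrefixChars.toList,
    pvAllSequencesA.any (fun cmd => cmd.toList.take 1 == [c]) = true :=
  List.all_eq_true.mp pvCoverB

-- the proper prefixes of the command list are [] and the singletons of the prefix characters
theorem pvKey (l : List Char) :
    (∃ cmd ∈ pvAllSequencesA, l <+: cmd.toList ∧ l ≠ cmd.toList) ↔
      (l = [] ∨ ∃ c, l = [c] ∧ c ∈ pvPrefixChars.toList) := by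
  constructor
  · rintro ⟨cmd, hm, hp, hne⟩
    have h2 := pvLen2 cmd hm
    have hlt : l.length < 2 := by
      rcases Nat.lt_or_ge l.length 2 with h | h
      · exact h
      · exact absurd (hp.eq_of_length (le_antisymm (h2 ▸ hp.length_le) (h2 ▸ h))) hne
    cases l with
    | nil => exact Or.inl rfl
    | cons c t =>
        have ht : t = [] := by
          cases t with
          | nil => rfl
          | cons d u => simp at hlt
        subst ht
        refine Or.inr ⟨c, rfl, ?_⟩
        have hh := pvHeadMem cmd hm
        have htk : cmd.toList.take 1 = [c] := by
          obtain ⟨suf, hsuf⟩ := hp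
          rw [← hsuf]
          rfl
        rw [hh.1] at htk
        injection htk with h1 _
        rw [← h1]
        exact hh.2
  · rintro (rfl | ⟨c, rfl, hc⟩)
    · exact ⟨"gg", by decide, List.nil_prefix, by decide⟩
    · obtain ⟨cmd, hm, ht'⟩ := List.any_eq_true.mp (pvCover c hc)
      have ht : cmd.toList.take 1 = [c] := by simpa using ht'
      refine ⟨cmd, hm, ?_, ?_⟩
      · rw [← ht]; exact List.take_prefix _ _
      · intro he
        have h2 := pvLen2 cmd hm
        rw [← he] at h2
        simp at h2

-- ===== VERDICT (by name: the statement is the Claim_ definition above) =====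
theorem has_partial_match_py_spec : Claim_equal_has_partial_match_py := by
  intro s _
  unfold Spec_has_partial_match_py has_partial_match_py has_partial_match_py_alt
  rw [pvScanA_eq_any, Bool.eq_iff_iff, List.any_eq_true]
  simp only [pvTest_eq, decide_eq_true_eq]
  rw [pvKey s.toList]
  by_cases h0 : s = ""
  · subst h0
    simp
  · have h0' : s.toList ≠ [] := fun h => h0 (String.ext_iff.mpr h)
    rw [if_neg (by simpa using h0)]
    simp only [Bool.and_eq_true, beq_iff_eq, PySem.Str.len_eq,
      PySem.Str.isIn_iff_infix]
    constructor
    · rintro (h | ⟨c, hl, hc⟩)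
      · exact absurd h h0'
      · refine ⟨by rw [hl]; rfl, ?_⟩
        rw [hl]
        exact (List.singleton_infix_iff c _).mpr hc
    · rintro ⟨hlen, hinf⟩
      have h1 : s.toList.length = 1 := by
        simp at hlen
        exact_mod_cast hlen
      obtain ⟨c, hl⟩ := List.length_eq_one_iff.mp h1
      refine Or.inr ⟨c, hl, (List.singleton_infix_iff c _).mp (hl ▸ hinf)⟩
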